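-- pv_equiv track=rewrite | github.com/ilaytzarfati1231/ned-server | app.py | convert_from_SEP
-- ===== SOURCE A (Python) =====
-- def convert_from_SEP(S):
--     seen = False
--     S1 = []
--     S2 = []
--     for s in S:
--         if s == "SEP":
--             seen = True
--             continue
--         elif not seen:
--             S1.append(s)
--         else:
--             S2.append(s)
--     return S1,S2
-- ===== SOURCE B (Python) =====
-- def convert_from_SEP(S):
--     if "SEP" not in S:
--         return list(S), []
--     i = S.index("SEP")
--     return list(S[:i]), [s for s in S[i + 1:] if s != "SEP"]
-- ===== Notes on version B (the rewrite author's own statement) =====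
-- stated objective: alternative
-- what changed: Replaces the single flag-driven accumulation pass with a locate-first-'SEP'-then-slice decomposition: the prefix is a plain slice and the part after the marker is a filter dropping further 'SEP' markers.
import Mathlib
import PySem

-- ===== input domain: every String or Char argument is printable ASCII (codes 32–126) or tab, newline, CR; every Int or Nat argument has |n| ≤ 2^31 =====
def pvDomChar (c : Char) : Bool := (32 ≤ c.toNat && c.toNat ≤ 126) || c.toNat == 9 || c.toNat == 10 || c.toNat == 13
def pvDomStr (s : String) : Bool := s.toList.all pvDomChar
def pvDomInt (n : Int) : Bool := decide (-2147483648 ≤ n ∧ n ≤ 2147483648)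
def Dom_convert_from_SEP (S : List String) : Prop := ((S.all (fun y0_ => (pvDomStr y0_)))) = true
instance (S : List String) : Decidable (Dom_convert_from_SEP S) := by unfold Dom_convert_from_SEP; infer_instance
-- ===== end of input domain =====

-- B replaces A's flag-driven single pass by a locate-index-then-slice/filter decomposition (same cost; alternative structure).


-- ===== PORT A =====
-- the for-loop of A, state (seen, S1, S2)
def pvLoopA : List String → Bool → List String → List String → List String × List String
  | [], _, S1, S2 => (S1, S2)
  | s :: rest, seen, S1, S2 =>
    if s = "SEP" then pvLoopA rest true S1 S2
    else if !seen then pvLoopA rest seen (S1 ++ [s]) S2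
    else pvLoopA rest seen S1 (S2 ++ [s])

def convert_from_SEP (S : List String) : List String × List String :=
  pvLoopA S false [] []

-- ===== PORT B =====
def convert_from_SEP_alt (S : List String) : List String × List String :=
  if "SEP" ∈ S then
    match PySem.List.index? S "SEP" with
    | some i =>
        (PySem.List.slice S none (some (i : Int)),
         (PySem.List.slice S (some ((i : Int) + 1)) none).filter (fun s => s ≠ "SEP"))
    | none => (S, [])   -- unreachable: "SEP" ∈ S
  else (S, [])

-- ===== PRECONDITION & SPEC =====
def Spec_convert_from_SEP (S : List String) (out : List String × List String) : Prop := out = convert_from_SEP_alt S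
instance (S : List String) (out : List String × List String) : Decidable (Spec_convert_from_SEP S out) := by unfold Spec_convert_from_SEP; infer_instance

-- ===== CLAIM (what is proved, stated in full; the proofs are below) =====
def Claim_equal_convert_from_SEP : Prop := ∀ (S : List String), Dom_convert_from_SEP S → Spec_convert_from_SEP S (convert_from_SEP S)

-- ===== LEMMAS AND PROOFS =====

-- once seen = true, A only filters the remaining "SEP"s into S2
theorem pvLoopA_seen (rest : List String) : ∀ (S1 S2 : List String),
    pvLoopA rest true S1 S2 = (S1, S2 ++ rest.filter (fun s => s ≠ "SEP")) := by
  induction rest with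
  | nil => intro S1 S2; simp [pvLoopA]
  | cons s rest ih =>
    intro S1 S2
    by_cases h : s = "SEP" <;> simp [pvLoopA, h, ih]

-- B on a cons with a non-"SEP" head
theorem alt_cons_ne (s : String) (rest : List String) (h : s ≠ "SEP") :
    convert_from_SEP_alt (s :: rest) =
      (s :: (convert_from_SEP_alt rest).1, (convert_from_SEP_alt rest).2) := by
  by_cases hm : "SEP" ∈ rest
  · have hm' : "SEP" ∈ s :: rest := List.mem_cons_of_mem _ hm
    obtain ⟨i, hi⟩ := (PySem.List.index?_isSome_iff (xs := rest) (v := "SEP")).2 hm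
      |> Option.isSome_iff_exists.mp
    have hcons : PySem.List.index? (s :: rest) "SEP" = some (i + 1) := by
      rw [PySem.List.index?_cons_of_ne rest h, hi]; rfl
    simp only [convert_from_SEP_alt, if_pos hm', if_pos hm, hcons, hi]
    refine Prod.ext ?_ ?_
    · have : ((i : Int) + 1) = ((i + 1 : Nat) : Int) := by push_cast; ring
      rw [this, PySem.List.slice_to_natCast, PySem.List.slice_to_natCast]
      simp [List.take_succ_cons]
    · have h2 : (((i + 1 : Nat) : Int) + 1) = ((i + 2 : Nat) : Int) := by push_cast; ring
      have h1 : ((i : Int) + 1) = ((i + 1 : Nat) : Int) := by push_cast; ring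
      rw [show ((i : Int) + 1) = ((i + 1 : Nat) : Int) from h1] at *
      rw [h2, PySem.List.slice_from_natCast, PySem.List.slice_from_natCast]
      simp [List.drop_succ_cons]
  · have hm' : "SEP" ∉ s :: rest := by
      intro hc; rcases List.mem_cons.mp hc with hc | hc
      · exact h hc.symm
      · exact hm hc
    simp [convert_from_SEP_alt, hm, hm']

-- the main invariant: A's loop with seen = false, S2 = [] computes B's value prefixed by S1
theorem pvLoopA_unseen (S : List String) : ∀ (S1 : List String),
    pvLoopA S false S1 [] = (S1 ++ (convert_from_SEP_alt S).1, (convert_from_SEP_alt S).2) := by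
  induction S with
  | nil => intro S1; simp [pvLoopA, convert_from_SEP_alt]
  | cons s rest ih =>
    intro S1
    by_cases h : s = "SEP"
    · subst h
      have hmem : ("SEP" : String) ∈ "SEP" :: rest := List.mem_cons_self
      have hidx : PySem.List.index? ("SEP" :: rest) "SEP" = some 0 :=
        PySem.List.index?_cons_self _ _
      simp only [pvLoopA, pvLoopA_seen, convert_from_SEP_alt, if_pos hmem, hidx]
      refine Prod.ext ?_ ?_
      · rw [PySem.List.slice_to_natCast]
        simp
      · have : ((0 : Nat) : Int) + 1 = ((1 : Nat) : Int) := by norm_num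
        rw [this, PySem.List.slice_from_natCast]
        simp
    · simp only [pvLoopA, if_neg h, Bool.not_false, ih, alt_cons_ne s rest h]
      simp

-- ===== VERDICT (by name: the statement is the Claim_ definition above) =====
theorem convert_from_SEP_spec : Claim_equal_convert_from_SEP := by
  intro S _
  unfold Spec_convert_from_SEP convert_from_SEP
  rw [pvLoopA_unseen]
  simp
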